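-- pv_equiv track=rewrite | github.com/BayernMuller/ctidy | tools/check_upstream.py | shared_value
-- ===== SOURCE A (Python) =====
-- def shared_value(values: dict[str, str], label: str) -> str:
--     unique = set(values.values())
--     if len(unique) != 1:
--         details = ", ".join(
--             f"{package}={value}" for package, value in sorted(values.items())
--         )
--         raise RuntimeError(f"Mismatched {label} across packages: {details}")
--     return next(iter(unique))
-- ===== SOURCE B (Python) =====
-- def shared_value(values: dict[str, str], label: str) -> str:
--     it = iter(values.values())
--     first = next(it, None)
--     if first is None or any(v != first for v in it):
--         details = ", ".join(
--             f"{package}={value}" for package, value in sorted(values.items())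
--         )
--         raise RuntimeError(f"Mismatched {label} across packages: {details}")
--     return first
-- ===== Notes on version B (the rewrite author's own statement) =====
-- stated objective: simpler
-- what changed: Replaces building a set of all values and counting its cardinality with a single-pass scan that takes the first value from an iterator and checks every remaining value equals it (empty dict counts as a mismatch), raising the identical RuntimeError message on failure.
import Mathlib
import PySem

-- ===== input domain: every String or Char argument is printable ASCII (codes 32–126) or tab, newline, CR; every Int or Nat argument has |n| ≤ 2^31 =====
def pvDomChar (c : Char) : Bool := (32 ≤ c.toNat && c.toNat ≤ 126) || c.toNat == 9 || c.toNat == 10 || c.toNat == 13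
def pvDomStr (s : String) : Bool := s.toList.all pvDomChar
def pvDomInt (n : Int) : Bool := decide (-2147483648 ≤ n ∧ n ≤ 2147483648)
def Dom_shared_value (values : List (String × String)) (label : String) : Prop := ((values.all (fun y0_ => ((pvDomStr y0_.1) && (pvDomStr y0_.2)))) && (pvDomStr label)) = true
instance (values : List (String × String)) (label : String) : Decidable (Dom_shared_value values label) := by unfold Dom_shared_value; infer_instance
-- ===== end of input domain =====

-- B replaces A's set-cardinality test by a first-value equality scan over the dict's values (simpler decomposition); equivalence is about the returned value, mismatch/empty inputs (where both raise) are excluded by Pre_.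


-- ===== PORT A =====
-- unique = set(values.values()); if len(unique) != 1: raise RuntimeError(...); return next(iter(unique))
-- The raise branch is outside Pre_; the port returns "" there. next(iter(unique)) on a
-- singleton set is its sole element (no hash-order dependence).
def shared_value (values : List (String × String)) (label : String) : String :=
  let unique := PySem.Set.ofList (PySem.Dict.values (PySem.Dict.ofList values))
  if unique.length ≠ 1 then ""   -- raise RuntimeError: excluded by Pre_shared_value
  else unique.headD ""

-- ===== PORT B =====
-- first = next(iter(values.values()), None); mismatch if no first or any later value differs.
def shared_value_alt (values : List (String × String)) (label : String) : String :=
  match PySem.Dict.values (PySem.Dict.ofList values) with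
  | [] => ""                      -- first is None → raise: excluded by Pre_shared_value
  | first :: rest =>
    if rest.any (fun v => v != first) then ""   -- raise RuntimeError: excluded by Pre_shared_value
    else first

-- ===== PRECONDITION & SPEC =====
-- Pre_ holds exactly where Python A returns: the dict is nonempty and all its values coincide
-- (otherwise both A and B raise RuntimeError with the same message).
def Pre_shared_value (values : List (String × String)) (label : String) : Prop :=
  PySem.Dict.values (PySem.Dict.ofList values) ≠ [] ∧
  ∀ w ∈ PySem.Dict.values (PySem.Dict.ofList values), w = (PySem.Dict.values (PySem.Dict.ofList values)).headD ""
instance (values : List (String × String)) (label : String) : Decidable (Pre_shared_value values label) := by unfold Pre_shared_value; infer_instance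

def pvWitness_shared_value : (List (String × String)) × String := ([("pkga", "1.2.0"), ("pkgb", "1.2.0")], "version")

def Spec_shared_value (values : List (String × String)) (label : String) (out : String) : Prop := out = shared_value_alt values label
instance (values : List (String × String)) (label : String) (out : String) : Decidable (Spec_shared_value values label out) := by unfold Spec_shared_value; infer_instance

-- ===== CLAIM (what is proved, stated in full; the proofs are below) =====
def Claim_equal_shared_value : Prop := ∀ (values : List (String × String)) (label : String), Dom_shared_value values label → Pre_shared_value values label → Spec_shared_value values label (shared_value values label)

-- ===== LEMMAS AND PROOFS =====

-- set(l) where every element of l equals v, folded onto a set already containing v, adds nothing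
theorem pv_foldl_add_const {v : String} : ∀ (l : List String), (∀ w ∈ l, w = v) →
    ∀ (s : PySem.Set String), v ∈ s → l.foldl PySem.Set.add s = s := by
  intro l
  induction l with
  | nil => intro _ s _; rfl
  | cons x xs ih =>
      intro h s hv
      have hx : x = v := h x (List.mem_cons_self)
      subst hx
      have hadd : PySem.Set.add s x = s := by simp [PySem.Set.add, hv]
      simp only [List.foldl_cons, hadd]
      exact ih (fun w hw => h w (List.mem_cons_of_mem _ hw)) s hv

-- set(v :: l) = {v} when every element of l equals v
theorem pv_ofList_const {v : String} (l : List String) (h : ∀ w ∈ l, w = v) :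
    PySem.Set.ofList (v :: l) = [v] := by
  rw [PySem.Set.ofList_eq_foldl]
  simp only [List.foldl_cons]
  have : PySem.Set.add ([] : PySem.Set String) v = [v] := rfl
  rw [this]
  exact pv_foldl_add_const l h [v] (List.mem_singleton.2 rfl)

-- ===== VERDICT (by name: the statement is the Claim_ definition above) =====
theorem shared_value_spec : Claim_equal_shared_value := by
  intro values label _hdom hpre
  unfold Spec_shared_value shared_value shared_value_alt
  unfold Pre_shared_value at hpre
  cases h : PySem.Dict.values (PySem.Dict.ofList values) with
  | nil => rw [h] at hpre; exact absurd rfl hpre.1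
  | cons v rest =>
      rw [h] at hpre
      have hall : ∀ w ∈ rest, w = v := by
        intro w hw
        simpa using hpre.2 w (List.mem_cons_of_mem _ hw)
      have hset : PySem.Set.ofList (v :: rest) = [v] := pv_ofList_const rest hall
      have hany : rest.any (fun w => w != v) = false := by
        simp only [List.any_eq_false]
        intro w hw
        simp [hall w hw]
      simp [hset, hany]
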